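-- pv_equiv track=rewrite | github.com/Junroot/Algorithm | programmers/42883.py | select_digit
-- ===== SOURCE A (Python) =====
-- def select_digit(number, k):
--     result = ""
--     min_selectable_index = 0
--     max_selectable_index = len(number) - k + 1
--     while k > 0:
--         max_digit = number[min_selectable_index]
--         max_index = min_selectable_index
--         for i in range(min_selectable_index, max_selectable_index):
--             if max_digit == "9":
--                 break
--             digit = number[i]
--             if digit > max_digit:
--                 max_digit = digit
--                 max_index = i
--         result += max_digit
--         min_selectable_index = max_index + 1
--         max_selectable_index += 1
--         k -= 1
--     return result
-- ===== SOURCE B (Python) =====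
-- def select_digit(number, k):
--     if k <= 0:
--         return ''
--     drops = len(number) - k
--     stack = []
--     for d in number:
--         while drops and stack and stack[-1] < d:
--             stack.pop()
--             drops -= 1
--         stack.append(d)
--     return ''.join(stack[:k])
-- ===== Notes on version B (the rewrite author's own statement) =====
-- stated objective: faster
-- what changed: Replaced the per-output-character rescan of the selection window (greedy max search repeated k times) by a single left-to-right monotonic-stack pass that pops at most len(number)-k smaller previous digits.
-- outside the precondition, e.g. on select_digit('9z', 1): A returns '9', B returns 'z'; on select_digit(':9:9', 3): A returns ':9:', B returns '::9'
import Mathlib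
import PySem

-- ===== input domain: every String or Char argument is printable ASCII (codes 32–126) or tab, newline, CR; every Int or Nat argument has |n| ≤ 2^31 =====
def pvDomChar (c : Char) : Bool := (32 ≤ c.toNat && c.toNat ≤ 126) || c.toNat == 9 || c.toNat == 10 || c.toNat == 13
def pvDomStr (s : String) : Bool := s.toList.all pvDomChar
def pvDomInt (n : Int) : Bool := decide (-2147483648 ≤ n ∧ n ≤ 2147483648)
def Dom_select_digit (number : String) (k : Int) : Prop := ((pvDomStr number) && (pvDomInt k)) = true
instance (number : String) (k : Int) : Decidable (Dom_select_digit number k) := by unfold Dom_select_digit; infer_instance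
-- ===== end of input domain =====

-- B replaces A's repeated greedy window rescans (O(n*k)) by one monotonic-stack pass (O(n)); equal on digit strings with 0 ≤ k ≤ len.

-- ===== PORT A =====
-- inner `for i in range(min_selectable_index, max_selectable_index)` loop with its
-- `break` on '9'; `number[i]` is in range on every admitted input, ported as getD.
def aInner (s : List Char) (i stop : Nat) (maxd : Char) (maxi : Nat) : Char × Nat :=
  if i < stop then
    if maxd = '9' then (maxd, maxi)
    else
      let d := s.getD i ' '
      if maxd < d then aInner s (i + 1) stop d i
      else aInner s (i + 1) stop maxd maxi
  else (maxd, maxi)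
termination_by stop - i

-- outer `while k > 0` loop; fuel = k (the loop runs exactly k times when k > 0).
def aOuter (s : List Char) (fuel minI maxSel : Nat) (acc : List Char) : List Char :=
  match fuel with
  | 0 => acc
  | f + 1 =>
    let maxd := s.getD minI ' '
    let r := aInner s minI maxSel maxd minI
    aOuter s f (r.2 + 1) (maxSel + 1) (acc ++ [r.1])

-- `max_selectable_index = len(number) - k + 1`: Nat subtraction agrees with Python's
-- int arithmetic whenever 0 ≤ k ≤ len(number) (Pre_); outside that A raises or k ≤ 0.
def select_digit (number : String) (k : Int) : String :=
  String.mk (aOuter number.toList k.toNat 0 (number.toList.length - k.toNat + 1) [])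

-- ===== PORT B =====
-- Python's stack list has its top at the END; here the stack list keeps its top at the
-- HEAD, so Python's `stack[:k]` is `reverse` then `take`.
def popPh (st : List Char) (d : Nat) (c : Char) : List Char × Nat :=
  match st, d with
  | t :: r, e + 1 => if t < c then popPh r e c else (t :: r, e + 1)
  | _, _ => (st, d)

def runS (s : List Char) (st : List Char) (d : Nat) : List Char :=
  match s with
  | [] => st
  | c :: rest =>
    let p := popPh st d c
    runS rest (c :: p.1) p.2

-- `drops = len(number) - k`: Nat subtraction agrees with Python on Pre_ (k ≤ len;
-- the k ≤ 0 case returns early).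
def select_digit_alt (number : String) (k : Int) : String :=
  if k ≤ 0 then ""
  else
    let s := number.toList
    String.mk ((runS s [] (s.length - k.toNat)).reverse.take k.toNat)

-- ===== PRECONDITION & SPEC =====
-- Pre_ excludes: k > len (A raises IndexError), and positive-k queries on strings that
-- contain a '9' together with characters above '9' — there A's '9'-shortcut (which
-- assumes '9' is the largest character, true on the problem's digit strings) can cut
-- the scan short and return an accidental value; B does the natural thing there.
def Pre_select_digit (number : String) (k : Int) : Prop :=
  k ≤ (number.toList.length : Int) ∧
    (k ≤ 0 ∨
     number.toList.all (fun c => c ≤ '9') = true ∨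
     number.toList.all (fun c => c ≠ '9') = true)
instance (number : String) (k : Int) : Decidable (Pre_select_digit number k) := by
  unfold Pre_select_digit; infer_instance

def pvWitness_select_digit : String × Int := ("1924", 2)

def Spec_select_digit (number : String) (k : Int) (out : String) : Prop := out = select_digit_alt number k
instance (number : String) (k : Int) (out : String) : Decidable (Spec_select_digit number k out) := by unfold Spec_select_digit; infer_instance

-- ===== CLAIM (what is proved, stated in full; the proofs are below) =====
def Claim_equal_select_digit : Prop := ∀ (number : String) (k : Int), Dom_select_digit number k → Pre_select_digit number k → Spec_select_digit number k (select_digit number k)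

-- ===== LEMMAS AND PROOFS =====

def pickL (m : Char) (pre w rest : List Char) : Char × List Char :=
  match w with
  | [] => (m, pre ++ rest)
  | c :: w' => if m < c then pickL c [] w' rest else pickL m (pre ++ [c]) w' rest

def firstGT (c : Char) : List Char → Option (List Char × Char × List Char)
  | [] => none
  | x :: v => if c < x then some ([], x, v) else (firstGT c v).map (fun p => (x :: p.1, p.2))

def G : Nat → List Char → List Char
  | 0, _ => []
  | k + 1, s =>
    match s with
    | [] => []
    | c :: u =>
      let r := pickL c [] (u.take (u.length - k)) (u.drop (u.length - k))
      r.1 :: G k r.2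

def remFA : List Char → List Char
  | [] => []
  | [_] => []
  | a :: b :: t => if a < b then b :: t else a :: remFA (b :: t)

def DInc : List Char → Prop
  | [] => True
  | [_] => True
  | a :: b :: t => b ≤ a ∧ DInc (b :: t)

lemma pickL_eq (w : List Char) : ∀ (m : Char) (pre rest : List Char),
    pickL m pre w rest =
      match firstGT m w with
      | none => (m, pre ++ (w ++ rest))
      | some p => pickL p.2.1 [] p.2.2 rest := by
  induction w with
  | nil => intro m pre rest; simp [pickL, firstGT]
  | cons c w' ih =>
    intro m pre rest
    by_cases h : m < c
    · simp [pickL, firstGT, h]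
    · simp only [pickL, firstGT, if_neg h, ih]
      cases hf : firstGT m w' with
      | none => simp
      | some p => simp

lemma firstGT_append_of_le (u : List Char) (c : Char) (h : ∀ x ∈ u, ¬ c < x) (w : List Char) :
    firstGT c (u ++ w) = (firstGT c w).map (fun p => (u ++ p.1, p.2)) := by
  induction u with
  | nil => simp [Option.map_id']
  | cons x u' ih =>
    have hx : ¬ c < x := h x (by simp)
    simp only [List.cons_append, firstGT, if_neg hx, ih (fun y hy => h y (by simp [hy]))]
    cases firstGT c w <;> simp

lemma chain_head_le (l : List Char) : ∀ c : Char, DInc (c :: l) → ∀ x ∈ l, x ≤ c := by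
  induction l with
  | nil => simp
  | cons b t ih =>
    intro c h x hx
    obtain ⟨hbc, ht⟩ : b ≤ c ∧ DInc (b :: t) := h
    rcases List.mem_cons.mp hx with hx | hx
    · exact hx ▸ hbc
    · exact le_trans (ih b ht x hx) hbc

lemma DInc_tail (c : Char) (l : List Char) (h : DInc (c :: l)) : DInc l := by
  cases l with
  | nil => trivial
  | cons b t => exact h.2

lemma firstGT_none_of_le (w : List Char) (c : Char) (h : ∀ x ∈ w, ¬ c < x) :
    firstGT c w = none := by
  have := firstGT_append_of_le w c h []
  simpa using this

lemma G_take (k : Nat) : ∀ s : List Char, DInc s → k ≤ s.length → G k s = s.take k := by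
  induction k with
  | zero => intro s _ _; simp [G]
  | succ k ih =>
    intro s hs hk
    match s with
    | c :: u =>
      have hall : ∀ x ∈ u.take (u.length - k), ¬ c < x := by
        intro x hx
        exact not_lt.2 (chain_head_le u c hs x (List.mem_of_mem_take hx))
      simp only [G, pickL_eq, firstGT_none_of_le _ _ hall, List.nil_append,
        List.take_append_drop]
      simp only [List.length_cons] at hk
      rw [ih u (DInc_tail _ _ hs) (by omega)]
      simp

lemma G_all : ∀ s : List Char, G s.length s = s := by
  intro s
  induction s with
  | nil => simp [G]
  | cons c u ih =>
    simp [G, pickL, ih]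

lemma remFA_asc : ∀ (p : List Char) (a b : Char) (t : List Char), DInc (p ++ [a]) → a < b →
    remFA (p ++ a :: b :: t) = p ++ b :: t := by
  intro p
  induction p with
  | nil => intro a b t _ hab; simp [remFA, hab]
  | cons c p' ih =>
    intro a b t h hab
    have hle : ∀ x ∈ p' ++ [a], x ≤ c := chain_head_le _ c h
    have hhd : ¬ c < List.headD (p' ++ a :: b :: t) ' ' := by
      cases p' with
      | nil => simpa using not_lt.2 (hle a (by simp))
      | cons y p'' => simpa using not_lt.2 (hle y (by simp))
    cases p' with
    | nil =>
      have : ¬ c < a := not_lt.2 (hle a (by simp))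
      simp [remFA, this, hab]
    | cons y p'' =>
      have hy : ¬ c < y := not_lt.2 (hle y (by simp))
      have h' : DInc ((y :: p'') ++ [a]) := DInc_tail c _ (by simpa using h)
      simp only [List.cons_append, remFA, if_neg hy]
      have ih' := ih a b t h' hab
      simp only [List.cons_append] at ih'
      rw [ih']

lemma remFA_noninc : ∀ s : List Char, DInc s → remFA s = s.dropLast := by
  intro s
  induction s with
  | nil => intro; simp [remFA]
  | cons c u ih =>
    intro h
    cases u with
    | nil => simp [remFA]
    | cons b t =>
      have : ¬ c < b := not_lt.2 h.1
      simp [remFA, this, ih h.2]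

lemma decomp : ∀ s : List Char,
    DInc s ∨ ∃ p a b t, s = p ++ a :: b :: t ∧ DInc (p ++ [a]) ∧ a < b := by
  intro s
  induction s with
  | nil => left; trivial
  | cons c u ih =>
    cases u with
    | nil => left; trivial
    | cons b t =>
      by_cases h : c < b
      · right; exact ⟨[], c, b, t, by simp, trivial, h⟩
      · rcases ih with hu | ⟨p, a, x, t', he, hch, hax⟩
        · left; exact ⟨not_lt.1 h, hu⟩
        · right
          refine ⟨c :: p, a, x, t', by simp [he], ?_, hax⟩
          have hhead : List.headD (p ++ [a]) ' ' ≤ c := by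
            cases p with
            | nil =>
              simp only [List.nil_append] at he ⊢
              cases he
              simpa using not_lt.1 h
            | cons y p' =>
              have : y = b := by
                have := congrArg (fun l => List.headD l ' ') he
                simpa using this.symm
              simp [this, not_lt.1 h]
          cases hp : (p ++ [a]) with
          | nil => simp at hp
          | cons y q =>
            rw [hp] at hch hhead
            have hyq : y ≤ c := by simpa using hhead
            show DInc (c :: (p ++ [a]))
            rw [hp]
            exact ⟨hyq, hch⟩

lemma take_append_big (p s : List Char) (m : Nat) (h : p.length ≤ m) :
    (p ++ s).take m = p ++ s.take (m - p.length) := by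
  rw [List.take_append, List.take_of_length_le h]

lemma drop_append_big (p s : List Char) (m : Nat) (h : p.length ≤ m) :
    (p ++ s).drop m = s.drop (m - p.length) := by
  rw [List.drop_append]
  have : p.drop m = [] := by apply List.drop_eq_nil_of_le; omega
  simp [this]

lemma take_append_small (p s : List Char) (m : Nat) (h : m ≤ p.length) :
    (p ++ s).take m = p.take m := by
  exact List.take_append_of_le_length h

lemma G_asc (k : Nat) : ∀ (p t : List Char) (a b : Char), DInc (p ++ [a]) → a < b →
    k ≤ p.length + t.length + 1 → G k (p ++ a :: b :: t) = G k (p ++ b :: t) := by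
  induction k with
  | zero => intro p t a b _ _ _; simp [G]
  | succ k ih =>
    intro p t a b h hab hk
    cases p with
    | nil =>
      -- window head is a, and a < b: the scan immediately moves to b in both lists
      simp only [List.nil_append, List.length_nil] at h hk ⊢
      have hkt : k ≤ t.length := by omega
      simp only [G, List.length_cons]
      have h1 : (b :: t).take (t.length + 1 - k) = b :: t.take (t.length - k) := by
        have : t.length + 1 - k = (t.length - k) + 1 := by omega
        simp [this]
      have h2 : (b :: t).drop (t.length + 1 - k) = t.drop (t.length - k) := by
        have : t.length + 1 - k = (t.length - k) + 1 := by omega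
        simp [this]
      rw [h1, h2]
      simp [pickL, hab]
    | cons c p' =>
      have hal : ∀ x ∈ p' ++ [a], x ≤ c := chain_head_le _ c (by simpa using h)
      have haln : ∀ x ∈ p' ++ [a], ¬ c < x := fun x hx => not_lt.2 (hal x hx)
      have hpn : ∀ x ∈ p', ¬ c < x := fun x hx => haln x (by simp [hx])
      have hIH : G k (p' ++ a :: b :: t) = G k (p' ++ b :: t) := by
        apply ih p' t a b (DInc_tail c _ (by simpa using h)) hab
        simp only [List.length_cons] at hk; omega
      simp only [List.cons_append, G, List.length_append, List.length_cons]
      by_cases hkt : k ≤ t.length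
      · -- window reaches past b in both lists
        set l := t.take (t.length - k) with hl
        have hW : (p' ++ a :: b :: t).take (p'.length + (t.length + 1 + 1) - k)
            = (p' ++ [a]) ++ b :: l := by
          rw [take_append_big _ _ _ (by omega)]
          have : p'.length + (t.length + 1 + 1) - k - p'.length = (t.length - k) + 2 := by omega
          rw [this]
          simp [hl, List.take_succ_cons]
        have hR : (p' ++ a :: b :: t).drop (p'.length + (t.length + 1 + 1) - k)
            = t.drop (t.length - k) := by
          rw [drop_append_big _ _ _ (by omega)]
          have : p'.length + (t.length + 1 + 1) - k - p'.length = (t.length - k) + 2 := by omega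
          rw [this]
          simp
        have hW' : (p' ++ b :: t).take (p'.length + (t.length + 1) - k)
            = p' ++ b :: l := by
          rw [take_append_big _ _ _ (by omega)]
          have : p'.length + (t.length + 1) - k - p'.length = (t.length - k) + 1 := by omega
          rw [this]
          simp [hl]
        have hR' : (p' ++ b :: t).drop (p'.length + (t.length + 1) - k)
            = t.drop (t.length - k) := by
          rw [drop_append_big _ _ _ (by omega)]
          have : p'.length + (t.length + 1) - k - p'.length = (t.length - k) + 1 := by omega
          rw [this]
          simp
        rw [hW, hR, hW', hR']
        rw [pickL_eq, pickL_eq]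
        rw [show (p' ++ [a]) ++ b :: l = (p' ++ [a]) ++ (b :: l) from rfl]
        rw [firstGT_append_of_le _ _ haln]
        rw [show p' ++ b :: l = p' ++ (b :: l) from rfl]
        rw [firstGT_append_of_le _ _ hpn]
        cases hf : firstGT c (b :: l) with
        | none =>
          have hlt : l ++ t.drop (t.length - k) = t := by simp [hl]
          simp only [Option.map_none, List.nil_append, List.append_assoc,
            List.cons_append]
          rw [hlt, hIH]
        | some q =>
          simp only [Option.map_some]
      · -- window stays inside p' ++ [a] resp. p'
        have hk' : k ≤ p'.length + t.length + 1 := by simp at hk; omega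
        have hm1 : p'.length + (t.length + 1 + 1) - k ≤ p'.length + 1 := by omega
        have hW : (p' ++ a :: b :: t).take (p'.length + (t.length + 1 + 1) - k)
            = (p' ++ [a]).take (p'.length + (t.length + 1 + 1) - k) := by
          rw [show p' ++ a :: b :: t = (p' ++ [a]) ++ b :: t by simp]
          exact take_append_small _ _ _ (by simp; omega)
        have hW' : (p' ++ b :: t).take (p'.length + (t.length + 1) - k)
            = p'.take (p'.length + (t.length + 1) - k) := by
          exact take_append_small _ _ _ (by omega)
        rw [hW, hW', pickL_eq, pickL_eq]
        have hf1 : firstGT c ((p' ++ [a]).take (p'.length + (t.length + 1 + 1) - k)) = none :=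
          firstGT_none_of_le _ _ (fun x hx => haln x (List.mem_of_mem_take hx))
        have hf2 : firstGT c (p'.take (p'.length + (t.length + 1) - k)) = none :=
          firstGT_none_of_le _ _ (fun x hx => hpn x (List.mem_of_mem_take hx))
        rw [hf1, hf2]
        simp only [List.nil_append]
        have e1 : (p' ++ [a]).take (p'.length + (t.length + 1 + 1) - k)
            ++ (p' ++ a :: b :: t).drop (p'.length + (t.length + 1 + 1) - k) = p' ++ a :: b :: t := by
          rw [hW.symm]; exact List.take_append_drop _ _
        have e2 : p'.take (p'.length + (t.length + 1) - k)
            ++ (p' ++ b :: t).drop (p'.length + (t.length + 1) - k) = p' ++ b :: t := by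
          rw [hW'.symm]; exact List.take_append_drop _ _
        rw [e1, e2]
        simp [hIH]

lemma DInc_dropLast : ∀ s : List Char, DInc s → DInc s.dropLast := by
  intro s
  induction s with
  | nil => intro; trivial
  | cons c u ih =>
    intro h
    cases u with
    | nil => trivial
    | cons b t =>
      have hb := ih h.2
      cases t with
      | nil => trivial
      | cons y t' => exact ⟨h.1, hb⟩

lemma take_dropLast (s : List Char) (k : Nat) (h : k ≤ s.length - 1) :
    s.dropLast.take k = s.take k := by
  rw [List.dropLast_eq_take, List.take_take]
  congr 1
  omega

lemma G_eq_iter (d : Nat) : ∀ s : List Char, d ≤ s.length →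
    G (s.length - d) s = remFA^[d] s := by
  induction d with
  | zero => intro s _; simpa using G_all s
  | succ d ih =>
    intro s hd
    rw [Function.iterate_succ_apply]
    rcases decomp s with hs | ⟨p, a, b, t, he, hch, hab⟩
    · -- non-increasing: remFA drops the last char
      rw [remFA_noninc s hs]
      have h1 : G (s.length - (d + 1)) s = s.take (s.length - (d + 1)) :=
        G_take _ s hs (by omega)
      have h2 : s.dropLast.length = s.length - 1 := by simp
      have h3 : G (s.dropLast.length - d) s.dropLast = remFA^[d] s.dropLast :=
        ih s.dropLast (by omega)
      rw [h1, ← h3, G_take _ _ (DInc_dropLast s hs) (by omega), h2]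
      rw [take_dropLast s _ (by omega)]
      congr 1
      omega
    · -- ascent: remFA removes it, G unchanged
      subst he
      rw [remFA_asc p a b t hch hab]
      have hlen : (p ++ a :: b :: t).length = p.length + t.length + 2 := by simp; omega
      have hlen' : (p ++ b :: t).length = p.length + t.length + 1 := by simp; omega
      rw [hlen] at hd ⊢
      rw [G_asc _ p t a b hch hab (by omega)]
      have := ih (p ++ b :: t) (by rw [hlen']; omega)
      rw [hlen'] at this
      rw [show p.length + t.length + 2 - (d + 1) = p.length + t.length + 1 - d by omega]
      exact this

lemma popPh_zero (st : List Char) (c : Char) : popPh st 0 c = (st, 0) := by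
  cases st <;> simp [popPh]

lemma popPh_no (st : List Char) (d : Nat) (c x : Char) (h : ¬ x < c) :
    popPh (x :: st) d c = (x :: st, d) := by
  cases d <;> simp [popPh, h]

lemma runS_zero (q : List Char) : ∀ st : List Char, runS q st 0 = q.reverse ++ st := by
  induction q with
  | nil => intro st; simp [runS]
  | cons c rest ih => intro st; simp [runS, popPh_zero, ih]

lemma runS_noPop (q : List Char) : ∀ (r : List Char) (c : Char) (st : List Char) (d : Nat),
    DInc (c :: q) → runS (q ++ r) (c :: st) d = runS r (q.reverse ++ c :: st) d := by
  induction q with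
  | nil => intro r c st d _; simp
  | cons x q' ih =>
    intro r c st d h
    have hx : ¬ c < x := not_lt.2 h.1
    simp only [List.cons_append, runS, popPh_no st d x c hx]
    rw [ih r x (c :: st) d h.2]
    simp

lemma runS_noninc (s : List Char) (h : DInc s) (d : Nat) : runS s [] d = s.reverse := by
  cases s with
  | nil => rfl
  | cons c u =>
    show runS (c :: u) [] d = _
    have : popPh [] d c = ([], d) := by cases d <;> simp [popPh]
    simp only [runS, this]
    rw [show (u : List Char) = u ++ [] by simp, runS_noPop u [] c [] d h]
    simp [runS]

lemma runS_asc (p : List Char) (a b : Char) (t : List Char) (d : Nat)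
    (h : DInc (p ++ [a])) (hab : a < b) :
    runS (p ++ a :: b :: t) [] (d + 1) = runS (p ++ b :: t) [] d := by
  cases p with
  | nil =>
    simp only [List.nil_append]
    show runS (a :: b :: t) [] (d+1) = runS (b :: t) [] d
    have h1 : popPh [] (d+1) a = ([], d+1) := by simp [popPh]
    have h2 : popPh [a] (d+1) b = popPh [] d b := by simp [popPh, hab]
    have h3 : popPh [] d b = ([], d) := by cases d <;> simp [popPh]
    simp [runS, h1, h2, h3]
  | cons c p' =>
    have hch : DInc (c :: (p' ++ [a])) := by simpa using h
    have h1 : popPh [] (d+1) c = ([], d+1) := by simp [popPh]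
    have h1' : popPh [] d c = ([], d) := by cases d <;> simp [popPh]
    simp only [List.cons_append, runS, h1, h1']
    rw [show p' ++ a :: b :: t = (p' ++ [a]) ++ (b :: t) by simp]
    rw [runS_noPop _ _ _ _ _ (by simpa using hch)]
    have hcp : DInc (c :: p') := by
      have h5 := DInc_dropLast ((c :: p') ++ [a]) (by simpa using hch)
      rwa [List.dropLast_concat] at h5
    rw [runS_noPop p' (b :: t) c [] d hcp]
    simp only [List.reverse_append, List.reverse_cons, List.reverse_nil, List.nil_append]
    show runS (b :: t) (a :: (p'.reverse ++ [c])) (d+1) = runS (b :: t) (p'.reverse ++ [c]) d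
    have h4 : popPh (a :: (p'.reverse ++ [c])) (d+1) b = popPh (p'.reverse ++ [c]) d b := by
      simp [popPh, hab]
    simp [runS, h4]

lemma SB_eq_iter (d : Nat) : ∀ s : List Char, d ≤ s.length →
    ((runS s [] d).reverse).take (s.length - d) = remFA^[d] s := by
  induction d with
  | zero =>
    intro s _
    simp [runS_zero, List.take_of_length_le]
  | succ d ih =>
    intro s hd
    rw [Function.iterate_succ_apply]
    rcases decomp s with hs | ⟨p, a, b, t, he, hch, hab⟩
    · rw [remFA_noninc s hs, runS_noninc s hs]
      have h2 : s.dropLast.length = s.length - 1 := by simp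
      have h3 := ih s.dropLast (by omega)
      rw [runS_noninc _ (DInc_dropLast s hs), h2] at h3
      rw [List.reverse_reverse] at h3 ⊢
      rw [show s.length - (d+1) = s.length - 1 - d by omega]
      rw [← h3, take_dropLast s _ (by omega)]
    · subst he
      rw [remFA_asc p a b t hch hab, runS_asc p a b t d hch hab]
      have hlen : (p ++ a :: b :: t).length = p.length + t.length + 2 := by simp; omega
      have hlen' : (p ++ b :: t).length = p.length + t.length + 1 := by simp; omega
      have h3 := ih (p ++ b :: t) (by rw [hlen']; omega)
      rw [hlen'] at h3
      rw [hlen, show p.length + t.length + 2 - (d+1) = p.length + t.length + 1 - d by omega]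
      exact h3

lemma seg_drop (s : List Char) (j i : Nat) (h : j ≤ i) :
    (s.drop j).take (i - j) ++ s.drop i = s.drop j := by
  conv_rhs => rw [← List.take_append_drop (i - j) (s.drop j)]
  rw [List.drop_drop]
  congr 2
  omega

lemma seg_snoc (s : List Char) (j i : Nat) (hj : j ≤ i) (hi : i < s.length) :
    (s.drop j).take (i - j) ++ [s[i]] = (s.drop j).take (i - j + 1) := by
  rw [List.take_succ]
  congr 1
  rw [List.getElem?_drop]
  rw [show j + (i - j) = i by omega]
  simp [List.getElem?_eq_getElem hi]

lemma seg_cons (s : List Char) (i stop : Nat) (h1 : i < stop) (h2 : i < s.length) :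
    (s.drop i).take (stop - i) = s[i] :: (s.drop (i + 1)).take (stop - (i + 1)) := by
  rw [show stop - i = (stop - (i + 1)) + 1 by omega, List.drop_eq_getElem_cons h2,
    List.take_succ_cons]

lemma aInner_eq (n : Nat) : ∀ (i stop maxi : Nat) (maxd : Char) (s : List Char),
    stop = i + n → stop ≤ s.length → maxi < i →
    ((∀ c ∈ s, c ≤ '9') ∨ '9' ∉ s) → maxd ∈ s →
    (aInner s i stop maxd maxi).2 < stop ∧
    pickL maxd ((s.drop (maxi + 1)).take (i - (maxi + 1))) ((s.drop i).take (stop - i)) (s.drop stop)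
      = ((aInner s i stop maxd maxi).1, s.drop ((aInner s i stop maxd maxi).2 + 1)) := by
  induction n with
  | zero =>
    intro i stop maxi maxd s hstop hle hmi _ _
    have hns : ¬ i < stop := by omega
    rw [aInner, if_neg hns]
    refine ⟨by omega, ?_⟩
    have h0 : stop - i = 0 := by omega
    rw [h0]
    simp only [List.take_zero, pickL]
    rw [show stop = i from by omega, seg_drop s (maxi + 1) i (by omega)]
  | succ n ih =>
    intro i stop maxi maxd s hstop hle hmi hH hmd
    have his : i < stop := by omega
    have hil : i < s.length := by omega
    rw [aInner, if_pos his]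
    by_cases hc : maxd = '9'
    · rw [if_pos hc]
      refine ⟨by omega, ?_⟩
      have hdig : ∀ c ∈ s, c ≤ '9' := by
        rcases hH with hdig | h9s
        · exact hdig
        · exact absurd (hc ▸ hmd) h9s
      have hall : ∀ x ∈ (s.drop i).take (stop - i), ¬ maxd < x := by
        intro x hx
        have hxs : x ∈ s := List.mem_of_mem_drop (List.mem_of_mem_take hx)
        have := hdig x hxs
        rw [hc]; exact not_lt.2 this
      rw [pickL_eq, firstGT_none_of_le _ _ hall]
      simp only
      rw [seg_drop s i stop (by omega), seg_drop s (maxi + 1) i (by omega)]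
    · rw [if_neg hc]
      have hd : s.getD i ' ' = s[i] := List.getD_eq_getElem s ' ' hil
      have hsim : s[i] ∈ s := List.getElem_mem hil
      rw [seg_cons s i stop his hil]
      simp only [hd]
      by_cases hlt : maxd < s[i]
      · have hIH := ih (i + 1) stop i (s[i]) s (by omega) hle (by omega) hH hsim
        rw [show i + 1 - (i + 1) = 0 from by omega] at hIH
        simp only [List.take_zero] at hIH
        rw [pickL, if_pos hlt, if_pos hlt]
        exact hIH
      · have hIH := ih (i + 1) stop maxi maxd s (by omega) hle (by omega) hH hmd
        rw [pickL, if_neg hlt, if_neg hlt]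
        rw [seg_snoc s (maxi + 1) i (by omega) hil,
          show i - (maxi + 1) + 1 = i + 1 - (maxi + 1) from by omega]
        exact hIH

lemma aInner_full (s : List Char) (minI stop : Nat) (h1 : minI < stop) (h2 : stop ≤ s.length)
    (hH : (∀ c ∈ s, c ≤ '9') ∨ '9' ∉ s) :
    (aInner s minI stop (s.getD minI ' ') minI).2 < stop ∧
    pickL (s.getD minI ' ') [] ((s.drop (minI + 1)).take (stop - (minI + 1))) (s.drop stop)
      = ((aInner s minI stop (s.getD minI ' ') minI).1,
         s.drop ((aInner s minI stop (s.getD minI ' ') minI).2 + 1)) := by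
  have hminI : minI < s.length := by omega
  have hd : s.getD minI ' ' = s[minI] := List.getD_eq_getElem s ' ' hminI
  rw [aInner, if_pos h1]
  simp only [hd]
  by_cases h9 : s[minI] = '9'
  · rw [if_pos h9]
    refine ⟨by omega, ?_⟩
    have hdig : ∀ c ∈ s, c ≤ '9' := by
      rcases hH with hdig | h9s
      · exact hdig
      · exact absurd (h9 ▸ List.getElem_mem hminI) h9s
    have hall : ∀ x ∈ (s.drop (minI + 1)).take (stop - (minI + 1)), ¬ s[minI] < x := by
      intro x hx
      have hxs : x ∈ s := List.mem_of_mem_drop (List.mem_of_mem_take hx)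
      rw [h9]; exact not_lt.2 (hdig x hxs)
    rw [pickL_eq, firstGT_none_of_le _ _ hall]
    simp only [List.nil_append]
    rw [seg_drop s (minI + 1) stop (by omega)]
  · rw [if_neg h9, if_neg (lt_irrefl s[minI])]
    exact (aInner_eq (stop - (minI + 1)) (minI + 1) stop minI (s[minI]) s (by omega) h2
      (by omega) hH (List.getElem_mem hminI)).imp id
      (fun h => by rw [show minI + 1 - (minI + 1) = 0 from by omega] at h; simpa using h)

lemma aOuter_G (fuel : Nat) : ∀ (s : List Char) (minI : Nat) (acc : List Char),
    ((∀ c ∈ s, c ≤ '9') ∨ '9' ∉ s) → minI + fuel ≤ s.length →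
    aOuter s fuel minI (s.length - fuel + 1) acc = acc ++ G fuel (s.drop minI) := by
  induction fuel with
  | zero => intro s minI acc _ _; simp [aOuter, G]
  | succ fuel ih =>
    intro s minI acc hH hle
    have hminI : minI < s.length := by omega
    have hms : s.length - (fuel + 1) + 1 = s.length - fuel := by omega
    simp only [aOuter]
    rw [hms]
    obtain ⟨hr2, hpick⟩ := aInner_full s minI (s.length - fuel) (by omega) (by omega) hH
    set r := aInner s minI (s.length - fuel) (s.getD minI ' ') minI with hr
    rw [ih s (r.2 + 1) (acc ++ [r.1]) hH (by omega)]
    -- right-hand side: unfold one step of G on s.drop minI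
    rw [List.drop_eq_getElem_cons hminI]
    simp only [G]
    have hu : (s.drop (minI + 1)).length = s.length - (minI + 1) := by simp
    have hwin : (s.drop (minI + 1)).length - fuel = s.length - fuel - (minI + 1) := by
      rw [hu]; omega
    have hrest : (s.drop (minI + 1)).drop (s.length - fuel - (minI + 1))
        = s.drop (s.length - fuel) := by
      rw [List.drop_drop]
      congr 1
      omega
    rw [hwin, hrest]
    rw [List.getD_eq_getElem s ' ' hminI] at hpick
    rw [hpick]
    simp

-- ===== VERDICT (by name: the statement is the Claim_ definition above) =====
theorem select_digit_spec : Claim_equal_select_digit := by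
  intro number k _ hpre
  obtain ⟨hkn, hdig⟩ := hpre
  show select_digit number k = select_digit_alt number k
  unfold select_digit select_digit_alt
  by_cases hk0 : k ≤ 0
  · rw [if_pos hk0, Int.toNat_of_nonpos hk0]
    rfl
  rw [if_neg hk0]
  set s := number.toList with hs
  have hkn' : k.toNat ≤ s.length := by omega
  have hH : (∀ c ∈ s, c ≤ '9') ∨ '9' ∉ s := by
    rcases hdig with h | h | h
    · omega
    · left
      intro c hc
      have := List.all_eq_true.mp h c hc
      simpa using this
    · right
      intro h9
      have := List.all_eq_true.mp h _ h9
      simp at this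
  have hA : aOuter s k.toNat 0 (s.length - k.toNat + 1) [] = G k.toNat s := by
    have := aOuter_G k.toNat s 0 [] hH (by omega)
    simpa using this
  have hG : G k.toNat s = remFA^[s.length - k.toNat] s := by
    have := G_eq_iter (s.length - k.toNat) s (by omega)
    rwa [show s.length - (s.length - k.toNat) = k.toNat from by omega] at this
  have hB : ((runS s [] (s.length - k.toNat)).reverse).take k.toNat
      = remFA^[s.length - k.toNat] s := by
    have := SB_eq_iter (s.length - k.toNat) s (by omega)
    rwa [show s.length - (s.length - k.toNat) = k.toNat from by omega] at this
  rw [hA, hG, ← hB]
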